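-- pv_equiv track=rewrite | github.com/LectureHubTeam/codemath-skills | skills/cp-solver/workspace/23ckththn3_solution.py | construct_min_base
-- ===== SOURCE A (Python) =====
-- def construct_min_base(N: int, k: int, L: str) -> str:
--     """
--     Construct minimum N-digit base B such that repeat(B, k) > L.
--     Returns empty string if impossible.
--     """
--     total_len = k * N
--
--     if total_len < len(L):
--         return ""
--
--     if total_len > len(L):
--         return "1" + "0" * (N - 1)
--
--     # total_len == len(L): Need repeat(B, k) > L
--     blocks = [L[i*N:(i+1)*N] for i in range(k)]
--     min_n_digit = 10**(N-1)
--
--     # For repeat(B, k) > L: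
--     # At first position i where B != blocks[i], need B > blocks[i]
--
--     # Case 1: B > blocks[0] → works, min B = blocks[0] + 1
--     # Case 2: B = blocks[0], then need B > blocks[1] (if exists)
--     #         → works if blocks[0] > blocks[1], min B = blocks[0]
--     # Case 3: B = blocks[0] = blocks[1], need B > blocks[2], etc.
--
--     # General: Find first j where blocks[j] != blocks[0]
--     # If blocks[j] < blocks[0]: B = blocks[0] works
--     # If blocks[j] > blocks[0]: B must be > blocks[0], so B = blocks[0] + 1
--
--     # If all blocks equal: B = blocks[0] + 1 (since B = blocks[0] gives equality)
--
--     block0_val = int(blocks[0])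
--
--     # Check if all blocks are equal to blocks[0]
--     all_equal = all(b == blocks[0] for b in blocks)
--
--     if all_equal:
--         # B = blocks[0] + 1
--         B_val = block0_val + 1
--         B_str = str(B_val)
--         if len(B_str) > N:
--             return ""  # Overflow, not N digits
--         return B_str.zfill(N)
--
--     # Find first block that differs from blocks[0]
--     first_diff_val = None
--     for b in blocks:
--         if b != blocks[0]:
--             first_diff_val = int(b)
--             break
--
--     if first_diff_val < block0_val:
--         # B = blocks[0] works (at first diff position, B > blocks[j])
--         B_val = block0_val
--         if B_val < min_n_digit:
--             return ""
--         return str(B_val).zfill(N)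
--     else:
--         # first_diff_val > block0_val
--         # B must be > blocks[0], so B = blocks[0] + 1
--         B_val = block0_val + 1
--         B_str = str(B_val)
--         if len(B_str) > N:
--             return ""
--         return B_str.zfill(N)
-- ===== SOURCE B (Python) =====
-- def construct_min_base(N: int, k: int, L: str) -> str:
--     """
--     Construct minimum N-digit base B such that repeat(B, k) > L.
--     Returns empty string if impossible.
--     """
--     total_len = k * N
--     if total_len < len(L):
--         return ""
--     if total_len > len(L):
--         return "1" + "0" * (N - 1)
--     # total_len == len(L): one repeated-string comparison decides everything.
--     block0 = L[:N]
--     v = int(block0)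
--     if block0 * k > L:
--         # B = block0 itself already wins at the first differing block.
--         return "" if v < 10 ** (N - 1) else str(v).zfill(N)
--     # block0 repeated is <= L, so the smallest candidate is block0 + 1.
--     B_str = str(v + 1)
--     return "" if len(B_str) > N else B_str.zfill(N)
-- ===== Notes on version B (the rewrite author's own statement) =====
-- stated objective: simpler
-- what changed: A's block-list construction, all-equal flag and first-diff block scan in the equal-length case are collapsed into one repeated-string comparison block0*k > L whose result picks between the same two candidate answers.
-- outside the precondition, e.g. on construct_min_base(2, 2, ' 91 '): A returns '', B returns '10'; on construct_min_base(2, 1, ' 7'): A returns '08', B returns '08'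
import Mathlib
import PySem

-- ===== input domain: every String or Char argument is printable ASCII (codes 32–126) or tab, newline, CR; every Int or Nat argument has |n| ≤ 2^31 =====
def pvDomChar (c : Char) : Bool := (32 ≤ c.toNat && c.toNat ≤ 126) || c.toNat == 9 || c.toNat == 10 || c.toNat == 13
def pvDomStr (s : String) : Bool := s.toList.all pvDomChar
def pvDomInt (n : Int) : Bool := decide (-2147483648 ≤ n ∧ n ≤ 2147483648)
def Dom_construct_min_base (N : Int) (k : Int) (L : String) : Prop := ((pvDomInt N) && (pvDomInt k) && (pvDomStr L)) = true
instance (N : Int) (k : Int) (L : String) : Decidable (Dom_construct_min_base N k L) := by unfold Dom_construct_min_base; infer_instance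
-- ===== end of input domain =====

-- B replaces A's block list / all-equal flag / first-diff scan by a single repeated-string
-- comparison block0*k > L (objective: simpler; same O(len L) cost).

-- ===== PORT A =====
def construct_min_base (N : Int) (k : Int) (L : String) : String :=
  let cs := L.toList
  let total_len := k * N
  if total_len < (cs.length : Int) then ""
  else if total_len > (cs.length : Int) then String.ofList ('1' :: List.replicate (N - 1).toNat '0')
  else
    let blocks := (PySem.List.pyRange 0 k).map
      (fun i => PySem.List.slice cs (some (i * N)) (some ((i + 1) * N)))
    let min_n_digit : Int := 10 ^ (N - 1).toNat
    match blocks with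
    | [] => ""  -- Python raises IndexError on blocks[0] here; outside Pre_
    | b0 :: _ =>
      match PySem.Int.ofChars? b0 with
      | none => ""  -- Python raises ValueError in int(blocks[0]) here; outside Pre_
      | some block0_val =>
        let all_equal := blocks.all (fun b => decide (b = b0))
        if all_equal then
          let B_val := block0_val + 1
          let B_str := PySem.Int.toChars B_val
          if (B_str.length : Int) > N then "" else String.ofList (PySem.Chars.zfill B_str N)
        else
          match blocks.find? (fun b => !(decide (b = b0))) with
          | none => ""  -- unreachable: some block differs from blocks[0]
          | some fd =>
            match PySem.Int.ofChars? fd with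
            | none => ""  -- Python raises ValueError in int(b) here; outside Pre_
            | some first_diff_val =>
              if first_diff_val < block0_val then
                if block0_val < min_n_digit then ""
                else String.ofList (PySem.Chars.zfill (PySem.Int.toChars block0_val) N)
              else
                let B_val := block0_val + 1
                let B_str := PySem.Int.toChars B_val
                if (B_str.length : Int) > N then "" else String.ofList (PySem.Chars.zfill B_str N)

-- ===== PORT B =====
def construct_min_base_alt (N : Int) (k : Int) (L : String) : String :=
  let cs := L.toList
  let total_len := k * N
  if total_len < (cs.length : Int) then ""
  else if total_len > (cs.length : Int) then String.ofList ('1' :: List.replicate (N - 1).toNat '0')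
  else
    let block0 := PySem.List.slice cs none (some N)
    match PySem.Int.ofChars? block0 with
    | none => ""  -- Python raises ValueError in int(block0) here; outside Pre_
    | some v =>
      if cs < PySem.List.pyRepeat block0 k then
        if v < 10 ^ (N - 1).toNat then ""
        else String.ofList (PySem.Chars.zfill (PySem.Int.toChars v) N)
      else
        let B_str := PySem.Int.toChars (v + 1)
        if (B_str.length : Int) > N then "" else String.ofList (PySem.Chars.zfill B_str N)

-- ===== PRECONDITION & SPEC =====
-- Pre_ excludes only the equal-length case (k*N = len L) on inputs that are not "N ≥ 1, k ≥ 1 and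
-- L a nonempty pure-digit string": there A raises IndexError/ValueError, except on int()-parsable
-- strings with whitespace/sign/underscore padding, where A's mix of string block-equality with
-- int-value comparison is an accident of its implementation.
def Pre_construct_min_base (N : Int) (k : Int) (L : String) : Prop :=
  k * N ≠ (L.toList.length : Int) ∨
    (1 ≤ N ∧ 1 ≤ k ∧ L.toList.all PySem.Chars.isdigit = true)
instance (N : Int) (k : Int) (L : String) : Decidable (Pre_construct_min_base N k L) := by
  unfold Pre_construct_min_base; infer_instance

def pvWitness_construct_min_base : Int × Int × String := (2, 2, "1234")

def Spec_construct_min_base (N : Int) (k : Int) (L : String) (out : String) : Prop := out = construct_min_base_alt N k L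
instance (N : Int) (k : Int) (L : String) (out : String) : Decidable (Spec_construct_min_base N k L out) := by unfold Spec_construct_min_base; infer_instance

-- ===== CLAIM (what is proved, stated in full; the proofs are below) =====
def Claim_equal_construct_min_base : Prop := ∀ (N : Int) (k : Int) (L : String), Dom_construct_min_base N k L → Pre_construct_min_base N k L → Spec_construct_min_base N k L (construct_min_base N k L)


-- ===== LEMMAS AND PROOFS =====

-- decimal value of a digit string (the value Python's int() computes on it)
def pvVal (cs : List Char) : Nat := cs.foldl (fun a c => a * 10 + (c.toNat - 48)) 0

-- the k blocks L[i*N:(i+1)*N] as drop/take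
def pvBlocks (xs : List Char) (n m : Nat) : List (List Char) :=
  (List.range m).map (fun j => (xs.drop (j * n)).take n)

-- capture of the private digit parser inside PySem.Int.ofChars? (assigned by unification, used abstractly)
theorem pvParserCapture : ∃ (d : List Char → Option Nat) (g : List Char → Bool → Nat → Option Nat),
    (∀ s : List Char, PySem.Int.ofChars? s =
      (match (List.dropWhile PySem.Int.isIntSpace (List.dropWhile PySem.Int.isIntSpace s).reverse).reverse with
       | '-' :: ds => Option.map (fun n => -(n:Int)) (do let a ← d ds; pure ((a:Nat) : Int))
       | '+' :: ds => Option.map (fun n => n) (do let a ← d ds; pure ((a:Nat) : Int))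
       | ds => Option.map (fun n => n) (do let a ← d ds; pure ((a:Nat) : Int)))) ∧
    (∀ (c : Char) (t : List Char), d (c :: t) =
      if c.isDigit = true then g t true (0 * 10 + (c.toNat - '0'.toNat))
      else if c = '_' ∧ false = true then
        (match t with
         | d' :: _ => if d'.isDigit = true then g t false 0 else none
         | [] => none)
      else none) ∧
    (∀ (b : Bool) (a : Nat), g [] b a = if b then some a else none) ∧
    (∀ (c : Char) (t : List Char) (b : Bool) (a : Nat), g (c :: t) b a =
      if c.isDigit = true then g t true (a * 10 + (c.toNat - '0'.toNat))
      else if c = '_' ∧ b = true then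
        (match t with
         | d' :: _ => if d'.isDigit = true then g t false a else none
         | [] => none)
      else none) := by
  apply Exists.intro
  apply Exists.intro
  refine ⟨fun s => rfl, ?_, ?_, ?_⟩
  · intro c t
    conv_lhs => whnf
    rfl
  · exact fun b a => rfl
  · exact fun c t b a => rfl

theorem pvDigit_toNat (c : Char) (h : c.isDigit = true) : 48 ≤ c.toNat ∧ c.toNat ≤ 57 := by
  simp [Char.isDigit] at h
  exact ⟨Fin.mk_le_mk.mp h.1, Fin.mk_le_mk.mp h.2⟩

theorem pvDigit_not_space (c : Char) (h : c.isDigit = true) : PySem.Int.isIntSpace c = false := by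
  have hb := pvDigit_toNat c h
  simp [PySem.Int.isIntSpace, Char.ext_iff, UInt32.ext_iff]
  omega

-- Python int() on a nonempty pure-digit string returns its decimal value
theorem pvParse_digits (cs : List Char) (hne : cs ≠ [])
    (hd : ∀ c ∈ cs, c.isDigit = true) :
    PySem.Int.ofChars? cs = some ((pvVal cs : Nat) : Int) := by
  obtain ⟨d, g, h1, h2, h3, h4⟩ := pvParserCapture
  have hgo : ∀ (t : List Char) (a : Nat), (∀ c ∈ t, c.isDigit = true) →
      g t true a = some (t.foldl (fun a c => a * 10 + (c.toNat - 48)) a) := by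
    intro t
    induction t with
    | nil => intro a _; simp [h3]
    | cons c t ih =>
      intro a hdt
      rw [h4]
      rw [if_pos (hdt c (by simp))]
      simpa using ih _ (fun x hx => hdt x (by simp [hx]))
  have hstrip : ∀ (u : List Char), (∀ c ∈ u, c.isDigit = true) →
      List.dropWhile PySem.Int.isIntSpace u = u := by
    intro u hu
    cases u with
    | nil => simp
    | cons c t => simp [pvDigit_not_space c (hu c (by simp))]
  have hrev : ∀ c ∈ cs.reverse, c.isDigit = true := by simpa using hd
  rw [h1, hstrip cs hd, hstrip cs.reverse hrev, List.reverse_reverse]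
  cases cs with
  | nil => exact absurd rfl hne
  | cons c t =>
    have hc : c.isDigit = true := hd c (by simp)
    have hcm : c ≠ '-' ∧ c ≠ '+' := by
      have := pvDigit_toNat c hc
      constructor <;> rintro rfl <;> simp [Char.toNat] at this
    split
    · next ds heq => exact absurd (List.cons.inj heq).1 hcm.1
    · next ds heq => exact absurd (List.cons.inj heq).1 hcm.2
    · next x h5 h6 =>
      rw [h2, if_pos hc, hgo t _ (fun x hx => hd x (by simp [hx]))]
      simp [pvVal]

theorem pvFoldl_shift (t : List Char) (a : Nat) :
    t.foldl (fun a c => a * 10 + (c.toNat - 48)) a = a * 10 ^ t.length + pvVal t := by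
  induction t generalizing a with
  | nil => simp [pvVal]
  | cons c t ih =>
    simp only [List.foldl_cons, pvVal, List.length_cons]
    rw [ih, ih (0 * 10 + (c.toNat - 48))]
    ring

theorem pvVal_cons (c : Char) (t : List Char) :
    pvVal (c :: t) = (c.toNat - 48) * 10 ^ t.length + pvVal t := by
  simp only [pvVal, List.foldl_cons]
  rw [pvFoldl_shift]
  simp [pvVal]

theorem pvVal_lt (t : List Char) (hd : ∀ c ∈ t, c.isDigit = true) :
    pvVal t < 10 ^ t.length := by
  induction t with
  | nil => simp [pvVal]
  | cons c t ih =>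
    have h9 : c.toNat ≤ 57 := (pvDigit_toNat c (hd c (by simp))).2
    have := ih (fun x hx => hd x (by simp [hx]))
    rw [pvVal_cons]
    simp only [List.length_cons, pow_succ]
    have h1 : (c.toNat - 48) ≤ 9 := by omega
    have h2 : (c.toNat - 48) * 10 ^ t.length ≤ 9 * 10 ^ t.length :=
      Nat.mul_le_mul_right _ h1
    omega

theorem pvCharLt (c c' : Char) : c < c' ↔ c.toNat < c'.toNat :=
  ⟨fun h => Fin.mk_lt_mk.mp h, fun h => Fin.mk_lt_mk.mpr h⟩

-- lexicographic order agrees with decimal value on equal-length digit strings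
theorem pvVal_lt_iff (a : List Char) : ∀ (b : List Char), a.length = b.length →
    (∀ c ∈ a, c.isDigit = true) → (∀ c ∈ b, c.isDigit = true) →
    (a < b ↔ pvVal a < pvVal b) := by
  induction a with
  | nil =>
    intro b hlen _ _
    cases b with
    | nil => simp [pvVal]
    | cons c' b => simp at hlen
  | cons c a ih =>
    intro b hlen ha hb
    cases b with
    | nil => simp at hlen
    | cons c' b =>
      simp only [List.length_cons, Nat.succ_inj] at hlen
      have hca := pvDigit_toNat c (ha c (by simp))
      have hcb := pvDigit_toNat c' (hb c' (by simp))
      have hva := pvVal_lt a (fun x hx => ha x (by simp [hx]))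
      have hvb := pvVal_lt b (fun x hx => hb x (by simp [hx]))
      rw [List.cons_lt_cons_iff, pvVal_cons, pvVal_cons, hlen]
      rcases Nat.lt_trichotomy c.toNat c'.toNat with hlt | heq | hgt
      · constructor
        · intro _
          have h1 : (c.toNat - 48) + 1 ≤ (c'.toNat - 48) := by omega
          have h2 : ((c.toNat - 48) + 1) * 10 ^ b.length ≤ (c'.toNat - 48) * 10 ^ b.length :=
            Nat.mul_le_mul_right _ h1
          rw [hlen] at hva
          nlinarith [Nat.zero_le (pvVal b)]
        · intro _; exact Or.inl ((pvCharLt c c').mpr hlt)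
      · have hcc : c = c' := Char.ext (UInt32.toNat_inj.mp heq)
        subst hcc
        constructor
        · rintro (h | ⟨_, h⟩)
          · exact absurd h (lt_irrefl c)
          · have := (ih b hlen (fun x hx => ha x (by simp [hx])) (fun x hx => hb x (by simp [hx]))).mp h
            omega
        · intro h
          have h' : pvVal a < pvVal b := by omega
          exact Or.inr ⟨rfl, (ih b hlen (fun x hx => ha x (by simp [hx])) (fun x hx => hb x (by simp [hx]))).mpr h'⟩
      · constructor
        · rintro (h | ⟨h, _⟩)
          · exact absurd ((pvCharLt c c').mp h) (by omega)
          · exact absurd (congrArg Char.toNat h) (by omega)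
        · intro h
          have h1 : (c'.toNat - 48) + 1 ≤ (c.toNat - 48) := by omega
          have h2 : ((c'.toNat - 48) + 1) * 10 ^ b.length ≤ (c.toNat - 48) * 10 ^ b.length :=
            Nat.mul_le_mul_right _ h1
          rw [hlen] at hva
          nlinarith [Nat.zero_le (pvVal a)]

theorem pvAppendLt (a : List Char) : ∀ (b u v : List Char), a.length = b.length →
    (a ++ u < b ++ v ↔ a < b ∨ (a = b ∧ u < v)) := by
  induction a with
  | nil =>
    intro b u v hlen
    cases b with
    | nil =>
      simp only [List.nil_append]
      constructor
      · intro h; exact Or.inr ⟨by simp, h⟩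
      · rintro (h | ⟨_, h⟩)
        · exact absurd h (lt_irrefl _)
        · exact h
    | cons c b => simp at hlen
  | cons c a ih =>
    intro b u v hlen
    cases b with
    | nil => simp at hlen
    | cons c' b =>
      simp only [List.length_cons, Nat.succ_inj] at hlen
      simp only [List.cons_append, List.cons_lt_cons_iff, ih b u v hlen, List.cons.injEq]
      tauto

-- first-differing-block characterisation of the repeated-block comparison
theorem pvFlattenLt (b0 : List Char) (n : Nat) (hb0 : b0.length = n) :
    ∀ (rest : List (List Char)), (∀ x ∈ rest, x.length = n) →
    (rest.flatten < (List.replicate rest.length b0).flatten ↔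
      (match rest.find? (fun b => !decide (b = b0)) with
       | some fd => fd < b0
       | none => False)) := by
  intro rest
  induction rest with
  | nil => simp
  | cons b rest ih =>
    intro hlen
    simp only [List.replicate_succ, List.flatten_cons, List.length_cons]
    rw [pvAppendLt b b0 _ _ ((hlen b (by simp)).trans hb0.symm)]
    by_cases hbb : b = b0
    · subst hbb
      rw [List.find?_cons_of_neg (by simp)]
      rw [ih (fun x hx => hlen x (by simp [hx]))]
      constructor
      · rintro (h | ⟨_, h⟩)
        · exact absurd h (lt_irrefl b)
        · exact h
      · intro h; exact Or.inr ⟨rfl, h⟩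
    · rw [List.find?_cons_of_pos (by simp [hbb])]
      constructor
      · rintro (h | ⟨h, _⟩)
        · exact h
        · exact absurd h hbb
      · intro h; exact Or.inl h

theorem pvBlocks_succ (xs : List Char) (n m : Nat) :
    pvBlocks xs n (m + 1) = xs.take n :: pvBlocks (xs.drop n) n m := by
  simp only [pvBlocks, List.range_succ_eq_map, List.map_cons, List.map_map]
  refine congrArg₂ _ (by simp) (List.map_congr_left ?_)
  intro j _
  simp only [Function.comp_apply, List.drop_drop]
  congr 1
  · congr 1
    simp [Nat.succ_mul]
    omega

theorem pvBlocks_flatten (n : Nat) :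
    ∀ (m : Nat) (xs : List Char), xs.length = m * n → (pvBlocks xs n m).flatten = xs := by
  intro m
  induction m with
  | zero => intro xs h; simp at h; simp [pvBlocks, h]
  | succ m ih =>
    intro xs h
    rw [pvBlocks_succ]
    simp only [List.flatten_cons]
    rw [ih (xs.drop n) (by simp [h, Nat.succ_mul])]
    exact List.take_append_drop n xs

theorem pvBlocks_len (n : Nat) :
    ∀ (m : Nat) (xs : List Char), xs.length = m * n → ∀ x ∈ pvBlocks xs n m, x.length = n := by
  intro m
  induction m with
  | zero => intro xs h x hx; simp [pvBlocks] at hx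
  | succ m ih =>
    intro xs h x hx
    rcases List.mem_cons.mp (pvBlocks_succ xs n m ▸ hx) with hx | hx
    · subst hx
      have hle : n ≤ xs.length := by
        rw [h]; exact Nat.le_mul_of_pos_left n (Nat.succ_pos m)
      rw [List.length_take]
      omega
    · exact ih (xs.drop n) (by simp [h, Nat.succ_mul]) x hx


-- ===== VERDICT (by name: the statement is the Claim_ definition above) =====
theorem construct_min_base_spec : Claim_equal_construct_min_base := by
  intro N k L _ hPre
  unfold Spec_construct_min_base construct_min_base construct_min_base_alt
  simp only []
  by_cases h1 : k * N < (L.toList.length : Int)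
  · rw [if_pos h1, if_pos h1]
  · rw [if_neg h1, if_neg h1]
    by_cases h2 : k * N > (L.toList.length : Int)
    · rw [if_pos h2, if_pos h2]
    · rw [if_neg h2, if_neg h2]
      have hEq : k * N = (L.toList.length : Int) := by omega
      rcases hPre with hne | ⟨hN, hk, hdig⟩
      · exact absurd hEq hne
      set cs := L.toList with hcs
      have hN0 : N = ((N.toNat : Nat) : Int) := (Int.toNat_of_nonneg (by omega)).symm
      have hk0 : k = ((k.toNat : Nat) : Int) := (Int.toNat_of_nonneg (by omega)).symm
      set n := N.toNat with hn
      set K := k.toNat with hK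
      have hn1 : 1 ≤ n := by omega
      have hK1 : 1 ≤ K := by omega
      have hlen : cs.length = K * n := by
        have := hEq
        rw [hN0, hk0] at this
        exact_mod_cast this.symm
      have hdigs : ∀ c ∈ cs, c.isDigit = true := by
        intro c hc
        have := List.all_eq_true.mp hdig c hc
        simpa [PySem.Chars.isdigit, Char.isDigit] using this
      have hblocks : (PySem.List.pyRange 0 k).map
          (fun i => PySem.List.slice cs (some (i * N)) (some ((i + 1) * N))) = pvBlocks cs n K := by
        rw [hk0, PySem.List.pyRange_zero_natCast, List.map_map]
        refine List.map_congr_left ?_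
        intro j _
        simp only [Function.comp_apply]
        rw [hN0]
        have e1 : ((j : Int) * (n : Int)) = ((j * n : Nat) : Int) := by push_cast; ring
        have e2 : (((j : Int) + 1) * (n : Int)) = ((j * n : Nat) : Int) + ((n : Nat) : Int) := by push_cast; ring
        rw [e1, e2, PySem.List.slice_natCast_add]
      rw [hblocks]
      obtain ⟨m, hm⟩ : ∃ m, K = m + 1 := ⟨K - 1, by omega⟩
      rw [hm, pvBlocks_succ]
      set b0 := cs.take n with hb0
      set rest := pvBlocks (cs.drop n) n m with hrest
      have hb0len : b0.length = n := by
        rw [hb0, List.length_take, hlen]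
        have : n ≤ K * n := Nat.le_mul_of_pos_left n (by omega)
        omega
      have hb0digs : ∀ c ∈ b0, c.isDigit = true := fun c hc =>
        hdigs c (List.mem_of_mem_take hc)
      have hb0ne : b0 ≠ [] := by
        intro h
        rw [h] at hb0len
        simp at hb0len
        omega
      have hrestlen : ∀ x ∈ rest, x.length = n := by
        intro x hx
        exact pvBlocks_len n m (cs.drop n) (by simp [hlen, hm, Nat.succ_mul]) x hx
      have hrestm : rest.length = m := by simp [hrest, pvBlocks]
      have hflat : b0 ++ rest.flatten = cs := by
        rw [hrest, pvBlocks_flatten n m (cs.drop n) (by simp [hlen, hm, Nat.succ_mul])]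
        exact List.take_append_drop n cs
      have hrestdigs : ∀ x ∈ rest, ∀ c ∈ x, c.isDigit = true := by
        intro x hx c hc
        refine hdigs c ?_
        rw [← hflat]
        exact List.mem_append_right _ (List.mem_flatten.mpr ⟨x, hx, hc⟩)
      -- B's block0 is blocks[0]
      have hsliceb0 : PySem.List.slice cs none (some N) = b0 := by
        rw [hN0]
        exact PySem.List.slice_to_natCast cs n
      rw [hsliceb0]
      simp only []
      rw [pvParse_digits b0 hb0ne hb0digs]
      simp only []
      -- B's comparison: cs < block0 * k  ↔  first differing block < b0
      have hrep : PySem.List.pyRepeat b0 k = (List.replicate (m + 1) b0).flatten := by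
        simp [PySem.List.pyRepeat, ← hK, hm]
      have hcmp : (cs < PySem.List.pyRepeat b0 k) ↔
          (match rest.find? (fun b => !decide (b = b0)) with
           | some fd => fd < b0
           | none => False) := by
        rw [hrep, ← hflat, List.replicate_succ, List.flatten_cons]
        rw [pvAppendLt b0 b0 _ _ rfl]
        rw [← hrestm, pvFlattenLt b0 n hb0len rest hrestlen]
        constructor
        · rintro (h | ⟨_, h⟩)
          · exact absurd h (lt_irrefl b0)
          · exact h
        · intro h; exact Or.inr ⟨rfl, h⟩
      have hallred : ((b0 :: rest).all (fun b => decide (b = b0))) = rest.all (fun b => decide (b = b0)) := by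
        simp
      rw [hallred]
      by_cases hall : rest.all (fun b => decide (b = b0)) = true
      · rw [if_pos hall]
        have hnone : rest.find? (fun b => !decide (b = b0)) = none :=
          List.find?_eq_none.mpr (fun x hx => by simp [of_decide_eq_true (List.all_eq_true.mp hall x hx)])
        have hnotlt : ¬ (cs < PySem.List.pyRepeat b0 k) := by
          rw [hcmp, hnone]
          exact not_false
        rw [if_neg hnotlt]
      · rw [if_neg hall]
        obtain ⟨x, hxmem, hxne⟩ : ∃ x ∈ rest, ¬ x = b0 := by
          rcases List.all_eq_false.mp (Bool.not_eq_true _ ▸ hall : rest.all (fun b => decide (b = b0)) = false) with ⟨x, hx, hxd⟩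
          exact ⟨x, hx, of_decide_eq_false (by simpa using hxd)⟩
        have hsome : (rest.find? (fun b => !decide (b = b0))).isSome := by
          rw [List.find?_isSome]
          exact ⟨x, hxmem, by simp [hxne]⟩
        obtain ⟨fd, hfd⟩ := Option.isSome_iff_exists.mp hsome
        have hfdmem : fd ∈ rest := List.mem_of_find?_eq_some hfd
        have hfdne : fd ≠ b0 := by
          have := List.find?_some hfd
          simpa using this
        have hfdlen : fd.length = n := hrestlen fd hfdmem
        have hfdne' : fd ≠ [] := by
          intro h; rw [h] at hfdlen; simp at hfdlen; omega
        have hfind : (b0 :: rest).find? (fun b => !decide (b = b0)) = some fd := by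
          rw [List.find?_cons_of_neg (by simp), hfd]
        rw [hfind]
        simp only []
        rw [pvParse_digits fd hfdne' (hrestdigs fd hfdmem)]
        simp only []
        have hivo : (((pvVal fd : Nat) : Int) < ((pvVal b0 : Nat) : Int)) ↔ (fd < b0) := by
          rw [Nat.cast_lt]
          exact (pvVal_lt_iff fd b0 (hfdlen.trans hb0len.symm) (hrestdigs fd hfdmem) hb0digs).symm
        have hcmp' : (cs < PySem.List.pyRepeat b0 k) ↔ fd < b0 := by
          rw [hcmp, hfd]
        by_cases hlt : fd < b0
        · rw [if_pos (hivo.mpr hlt), if_pos (hcmp'.mpr hlt)]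
        · rw [if_neg (fun hh => hlt (hivo.mp hh)), if_neg (fun hh => hlt (hcmp'.mp hh))]
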